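-- pv_equiv track=rewrite | github.com/rkudipud/chopper | src/chopper/parser/proc_extractor.py | _line_ends_with_continuation
-- ===== SOURCE A (Python) =====
-- def _line_ends_with_continuation(line: str) -> bool:
--     """True iff ``line`` ends with an unescaped ``\\`` (continuation marker)."""
--     stripped = line.rstrip("\r")
--     if not stripped.endswith("\\"):
--         return False
--     # Count trailing backslashes — odd count means the final one is a continuation.
--     k = 0
--     while k < len(stripped) and stripped[-1 - k] == "\\":
--         k += 1
--     return k % 2 == 1
-- ===== SOURCE B (Python) =====
-- def _line_ends_with_continuation(line: str) -> bool:
--     """True iff ``line`` ends with an unescaped ``\\`` (continuation marker)."""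
--     parity = False   # parity of the backslash run currently ending here
--     answer = False   # answer for the prefix read so far
--     for c in line:
--         if c == "\\":
--             parity = not parity
--             answer = parity
--         elif c == "\r":
--             parity = False      # '\r' breaks a run but, if trailing, is stripped
--         else:
--             parity = False
--             answer = False
--     return answer
-- ===== Notes on version B (the rewrite author's own statement) =====
-- stated objective: alternative
-- what changed: Replaces A's rstrip + endswith guard + backward index-walking while loop by a single left-to-right pass of a two-bit automaton (current backslash-run parity, answer so far); no stripping, no backward scan, no counter.
import Mathlib
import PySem

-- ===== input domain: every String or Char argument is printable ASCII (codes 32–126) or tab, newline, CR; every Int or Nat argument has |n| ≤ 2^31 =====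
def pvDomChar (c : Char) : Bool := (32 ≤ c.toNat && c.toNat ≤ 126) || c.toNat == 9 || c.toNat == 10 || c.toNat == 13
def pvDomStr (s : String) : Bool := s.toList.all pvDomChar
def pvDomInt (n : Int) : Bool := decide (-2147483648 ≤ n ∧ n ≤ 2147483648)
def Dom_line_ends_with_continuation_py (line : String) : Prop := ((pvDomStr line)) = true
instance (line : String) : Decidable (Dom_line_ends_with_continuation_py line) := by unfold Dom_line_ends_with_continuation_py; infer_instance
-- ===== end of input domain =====

-- B replaces A's rstrip + endswith guard + backward while loop by one forward pass of a
-- two-bit automaton (run parity, answer so far) over the characters (alternative algorithm).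


-- str.rstrip(chars) with a single strip character: drop the trailing run of c.
-- Exact for Python's one-sided rstrip with an explicit character set {c}.
def pyRstripChar (s : List Char) (c : Char) : List Char :=
  (s.reverse.dropWhile (· == c)).reverse

-- ===== PORT A =====
-- A's while loop: k starts at 0 and advances while stripped[-1-k] == '\\'.
def contWhile (stripped : List Char) (k : Nat) : Nat :=
  if k < stripped.length ∧ PySem.List.pyGet? stripped (-1 - (k : Int)) = some '\\' then
    contWhile stripped (k + 1)
  else k
termination_by stripped.length - k

def line_ends_with_continuation_py (line : String) : Bool :=
  let stripped := pyRstripChar line.toList '\r'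
  if ¬ PySem.Chars.endswith stripped ['\\'] then false
  else contWhile stripped 0 % 2 == 1

-- ===== PORT B =====
-- B's loop body: state = (parity of the backslash run ending here, answer so far).
def contStep (st : Bool × Bool) (c : Char) : Bool × Bool :=
  if c == '\\' then (!st.1, !st.1)
  else if c == '\r' then (false, st.2)
  else (false, false)

def line_ends_with_continuation_py_alt (line : String) : Bool :=
  (line.toList.foldl contStep (false, false)).2

-- ===== PRECONDITION & SPEC =====
def Spec_line_ends_with_continuation_py (line : String) (out : Bool) : Prop := out = line_ends_with_continuation_py_alt line
instance (line : String) (out : Bool) : Decidable (Spec_line_ends_with_continuation_py line out) := by unfold Spec_line_ends_with_continuation_py; infer_instance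

-- ===== CLAIM (what is proved, stated in full; the proofs are below) =====
def Claim_equal_line_ends_with_continuation_py : Prop := ∀ (line : String), Dom_line_ends_with_continuation_py line → Spec_line_ends_with_continuation_py line (line_ends_with_continuation_py line)

-- ===== LEMMAS AND PROOFS =====

-- parity of the trailing backslash run of s
def runOdd (s : List Char) : Bool :=
  (s.reverse.takeWhile (· == '\\')).length % 2 == 1

-- negative indexing from the end equals indexing the reverse
theorem pyGet_neg (s : List Char) (k : Nat) (hk : k < s.length) :
    PySem.List.pyGet? s (-1 - (k : Int)) = s.reverse[k]? := by
  simp only [PySem.List.pyGet?, PySem.List.pyIdx?]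
  have h1 : ¬ (0 : Int) ≤ -1 - (k : Int) := by omega
  have h2 : -(s.length : Int) ≤ -1 - (k : Int) := by omega
  rw [if_neg h1, if_pos h2]
  have h3 : ((-(-1 - (k : Int))).toNat) = k + 1 := by omega
  rw [h3]
  simp only [Option.bind]
  rw [List.getElem?_reverse (by omega)]
  have : s.length - 1 - k = s.length - (k + 1) := by omega
  rw [this]

-- A's loop computes k plus the length of the run of '\\' in s.reverse starting at k.
theorem contWhile_eq (s : List Char) (k : Nat) :
    contWhile s k = k + ((s.reverse.drop k).takeWhile (· == '\\')).length := by
  rw [contWhile]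
  split
  · rename_i h
    obtain ⟨hk, hget⟩ := h
    have hrev : s.reverse[k]? = some '\\' := by
      rw [← pyGet_neg s k hk]; exact hget
    have hdrop : s.reverse.drop k = '\\' :: s.reverse.drop (k + 1) := by
      have hk' : k < s.reverse.length := by simpa using hk
      rw [List.drop_eq_getElem_cons hk']
      have : s.reverse[k] = '\\' := by
        have := List.getElem?_eq_getElem hk'
        rw [this] at hrev; exact Option.some.inj hrev
      rw [this]
    rw [contWhile_eq s (k + 1), hdrop]
    simp
    omega
  · rename_i h
    push Not at h
    by_cases hk : k < s.length
    · have hrev := h hk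
      have hk' : k < s.reverse.length := by simpa using hk
      rw [List.drop_eq_getElem_cons hk']
      have hne : s.reverse[k] ≠ '\\' := by
        intro he
        apply hrev
        rw [pyGet_neg s k hk, List.getElem?_eq_getElem hk', he]
      have hbe : (s.reverse[k] == '\\') = false := by
        simpa using hne
      simp only [List.takeWhile_cons, hbe]
      simp
    · have : s.reverse.drop k = [] := by
        apply List.drop_eq_nil_of_le; simpa using Nat.le_of_not_lt hk
      simp [this]
termination_by s.length - k

-- endswith '\\' iff the trailing run is nonempty
theorem endswith_iff_run (s : List Char) :
    PySem.Chars.endswith s ['\\'] = true ↔ (s.reverse.takeWhile (· == '\\')).length ≠ 0 := by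
  rw [PySem.Chars.endswith_iff]
  constructor
  · rintro ⟨t, ht⟩
    have : s.reverse = '\\' :: t.reverse := by rw [← ht]; simp
    rw [this]; simp
  · intro h
    cases hs : s.reverse with
    | nil => rw [hs] at h; simp at h
    | cons c t =>
      have hc : c = '\\' := by
        by_contra hc
        rw [hs, List.takeWhile_cons, if_neg (by simp [hc])] at h
        simp at h
      have : s = t.reverse ++ ['\\'] := by
        have := congrArg List.reverse hs
        simpa [hc] using this
      exact ⟨t.reverse, this.symm⟩

-- A's value is the parity of the trailing backslash run of the '\r'-stripped line
theorem A_eq_runOdd (line : String) :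
    line_ends_with_continuation_py line = runOdd (pyRstripChar line.toList '\r') := by
  unfold line_ends_with_continuation_py runOdd
  set s := pyRstripChar line.toList '\r'
  simp only []
  by_cases he : PySem.Chars.endswith s ['\\'] = true
  · rw [if_neg (by simp [he]), contWhile_eq s 0]
    simp
  · have h0 : (s.reverse.takeWhile (· == '\\')).length = 0 := by
      by_contra h; exact he ((endswith_iff_run s).mpr h)
    rw [if_pos (by simp [he]), h0]
    simp

theorem runOdd_append_bslash (p : List Char) :
    runOdd (p ++ ['\\']) = !runOdd p := by
  unfold runOdd
  rw [List.reverse_append]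
  simp only [List.reverse_cons, List.reverse_nil, List.nil_append, List.cons_append,
    List.takeWhile_cons]
  simp only [beq_self_eq_true, if_pos, List.length_cons]
  set n := (p.reverse.takeWhile (· == '\\')).length
  rcases Nat.mod_two_eq_zero_or_one n with h | h <;> rw [Nat.add_mod, h] <;> first
    | simp [h]
    | simp

theorem runOdd_append_other (p : List Char) (c : Char) (hc : c ≠ '\\') :
    runOdd (p ++ [c]) = false := by
  unfold runOdd
  rw [List.reverse_append]
  simp [hc]

theorem rstrip_append_cr (p : List Char) :
    pyRstripChar (p ++ ['\r']) '\r' = pyRstripChar p '\r' := by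
  unfold pyRstripChar
  rw [List.reverse_append]
  simp

theorem rstrip_append_other (p : List Char) (c : Char) (hc : c ≠ '\r') :
    pyRstripChar (p ++ [c]) '\r' = p ++ [c] := by
  unfold pyRstripChar
  rw [List.reverse_append]
  simp [hc]

-- B's fold maintains (run parity of the prefix, run parity of the '\r'-stripped prefix)
theorem foldl_contStep (p : List Char) :
    p.foldl contStep (false, false) = (runOdd p, runOdd (pyRstripChar p '\r')) := by
  induction p using List.reverseRecOn with
  | nil => simp [runOdd, pyRstripChar]
  | append_singleton p c ih =>
    rw [List.foldl_append, ih]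
    simp only [List.foldl_cons, List.foldl_nil]
    unfold contStep
    by_cases hb : c = '\\'
    · subst hb
      rw [if_pos (by simp)]
      rw [runOdd_append_bslash, rstrip_append_other p '\\' (by decide),
        runOdd_append_bslash]
    · rw [if_neg (by simpa using hb)]
      by_cases hr : c = '\r'
      · subst hr
        rw [if_pos (by simp), runOdd_append_other p '\r' (by decide), rstrip_append_cr]
      · rw [if_neg (by simpa using hr), runOdd_append_other p c hb,
          rstrip_append_other p c hr, runOdd_append_other p c hb]

-- ===== VERDICT (by name: the statement is the Claim_ definition above) =====
theorem line_ends_with_continuation_py_spec : Claim_equal_line_ends_with_continuation_py := by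
  intro line _
  unfold Spec_line_ends_with_continuation_py line_ends_with_continuation_py_alt
  rw [A_eq_runOdd, foldl_contStep]
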